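-- pv_equiv track=rewrite | github.com/DAHYUN-HAN/Algorithm_Study | candidate_solution.py | check_minimality
-- ===== SOURCE A (Python) =====
-- from itertools import combinations
--
-- def check_minimality(combination_list, candidate_list):
--     for a in range(len(combination_list)):
--         for b in combinations(combination_list, a+1):
--             new_list = []
--             for c in range(len(b)):
--                 new_list.append(b[c])
--                 if(new_list in candidate_list):
--                     return True
--     return False
-- ===== SOURCE B (Python) =====
-- def check_minimality(combination_list, candidate_list):
--     # For each candidate, a single greedy two-pointer subsequence test
--     # against combination_list; True on first nonempty candidate that matches.
--     for cand in candidate_list: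
--         if not cand:
--             continue
--         i = 0
--         for x in combination_list:
--             if i < len(cand) and cand[i] == x:
--                 i += 1
--         if i == len(cand):
--             return True
--     return False
-- ===== Notes on version B (the rewrite author's own statement) =====
-- stated objective: faster
-- what changed: A enumerates all combinations of every size and checks each prefix against candidate_list; B observes that these prefixes are exactly the nonempty subsequences and tests each candidate directly with a linear greedy two-pointer subsequence scan.
import Mathlib
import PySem

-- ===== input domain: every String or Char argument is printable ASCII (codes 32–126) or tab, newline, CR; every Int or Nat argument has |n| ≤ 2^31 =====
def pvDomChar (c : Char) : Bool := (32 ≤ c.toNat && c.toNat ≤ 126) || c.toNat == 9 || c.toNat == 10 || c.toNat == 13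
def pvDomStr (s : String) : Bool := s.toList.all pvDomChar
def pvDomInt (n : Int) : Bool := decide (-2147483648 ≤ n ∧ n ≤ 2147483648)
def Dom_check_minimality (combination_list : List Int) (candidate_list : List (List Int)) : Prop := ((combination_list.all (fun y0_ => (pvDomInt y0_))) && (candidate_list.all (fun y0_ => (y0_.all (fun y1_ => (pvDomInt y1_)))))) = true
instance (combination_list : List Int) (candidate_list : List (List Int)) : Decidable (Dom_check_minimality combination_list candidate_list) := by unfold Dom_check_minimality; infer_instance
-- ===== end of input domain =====

-- B replaces A's exponential enumeration of all combinations (and their prefixes) by a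
-- linear greedy two-pointer subsequence test per candidate (objective: faster).

-- ===== PORT A =====
-- itertools.combinations(l, n), in itertools order (those containing l's head first)
def pvCombos : Nat → List Int → List (List Int)
  | 0, _ => [[]]
  | _ + 1, [] => []
  | n + 1, x :: xs => (pvCombos n xs).map (x :: ·) ++ pvCombos (n + 1) xs

-- inner 'for c in range(len(b))' loop of A: acc is new_list so far
def pvPrefCheck (candidate_list : List (List Int)) : List Int → List Int → Bool
  | _, [] => false
  | acc, x :: rest =>
      let acc' := acc ++ [x]
      if candidate_list.contains acc' then true else pvPrefCheck candidate_list acc' rest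

def check_minimality (combination_list : List Int) (candidate_list : List (List Int)) : Bool :=
  (List.range combination_list.length).any fun a =>
    (pvCombos (a + 1) combination_list).any fun b =>
      pvPrefCheck candidate_list [] b

-- ===== PORT B =====
-- greedy two-pointer scan: i = number of matched elements of cand so far
def pvMatchCount (cand : List Int) : Nat → List Int → Nat
  | i, [] => i
  | i, x :: xs =>
      if i < cand.length ∧ cand[i]? = some x then pvMatchCount cand (i + 1) xs
      else pvMatchCount cand i xs

def check_minimality_alt (combination_list : List Int) (candidate_list : List (List Int)) : Bool :=
  candidate_list.any fun cand =>
    !cand.isEmpty && (pvMatchCount cand 0 combination_list == cand.length)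

-- ===== PRECONDITION & SPEC =====
def Spec_check_minimality (combination_list : List Int) (candidate_list : List (List Int)) (out : Bool) : Prop := out = check_minimality_alt combination_list candidate_list
instance (combination_list : List Int) (candidate_list : List (List Int)) (out : Bool) : Decidable (Spec_check_minimality combination_list candidate_list out) := by unfold Spec_check_minimality; infer_instance

-- ===== CLAIM (what is proved, stated in full; the proofs are below) =====
def Claim_equal_check_minimality : Prop := ∀ (combination_list : List Int) (candidate_list : List (List Int)), Dom_check_minimality combination_list candidate_list → Spec_check_minimality combination_list candidate_list (check_minimality combination_list candidate_list)

-- ===== LEMMAS AND PROOFS =====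

-- sublist from a cons with a different head
theorem pv_cons_sublist_cons_ne {a b : Int} {l₁ l₂ : List Int} (h : a ≠ b) :
    (a :: l₁).Sublist (b :: l₂) ↔ (a :: l₁).Sublist l₂ := by
  constructor
  · intro hs
    cases hs with
    | cons _ h' => exact h'
    | cons₂ => exact absurd rfl h
  · intro hs; exact hs.cons b

-- membership in pvCombos = sublist of the given length
theorem pv_mem_combos_zero (l p : List Int) :
    p ∈ pvCombos 0 l ↔ p.Sublist l ∧ p.length = 0 := by
  simp only [pvCombos, List.mem_singleton, List.length_eq_zero_iff]
  constructor
  · rintro rfl; exact ⟨List.nil_sublist _, rfl⟩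
  · rintro ⟨_, h⟩; exact h

theorem pv_mem_combos (n : Nat) (l : List Int) (p : List Int) :
    p ∈ pvCombos n l ↔ p.Sublist l ∧ p.length = n := by
  induction l generalizing n p with
  | nil =>
    cases n with
    | zero => exact pv_mem_combos_zero [] p
    | succ n =>
      simp only [pvCombos, List.not_mem_nil, false_iff]
      rintro ⟨h, hl⟩
      rw [List.sublist_nil.mp h] at hl
      simp at hl
  | cons x xs ih =>
    cases n with
    | zero => exact pv_mem_combos_zero (x :: xs) p
    | succ n =>
      simp only [pvCombos, List.mem_append, List.mem_map, ih]
      constructor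
      · rintro (⟨q, ⟨hq, hql⟩, rfl⟩ | ⟨hp, hpl⟩)
        · exact ⟨List.cons_sublist_cons.mpr hq, by simp [hql]⟩
        · exact ⟨hp.cons x, hpl⟩
      · rintro ⟨hs, hl⟩
        cases hs with
        | cons _ h' => exact Or.inr ⟨h', hl⟩
        | cons₂ _ h' =>
          exact Or.inl ⟨_, ⟨h', by simpa using hl⟩, rfl⟩

-- pvPrefCheck finds a nonempty prefix q of l with acc ++ q in candidate_list
theorem pv_prefCheck_iff (cands : List (List Int)) (l acc : List Int) :
    pvPrefCheck cands acc l = true ↔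
      ∃ q, q ≠ [] ∧ q <+: l ∧ (acc ++ q) ∈ cands := by
  induction l generalizing acc with
  | nil =>
    simp only [pvPrefCheck, Bool.false_eq_true, false_iff]
    rintro ⟨q, hq, hql, _⟩
    exact absurd (List.prefix_nil.mp hql) hq
  | cons x rest ih =>
    rw [show pvPrefCheck cands acc (x :: rest)
          = if cands.contains (acc ++ [x]) then true
            else pvPrefCheck cands (acc ++ [x]) rest from rfl]
    by_cases hc : cands.contains (acc ++ [x]) = true
    · rw [if_pos hc]
      constructor
      · intro _
        exact ⟨[x], by simp, ⟨rest, rfl⟩, List.contains_iff_mem.mp hc⟩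
      · intro _; rfl
    · rw [if_neg (by simpa using hc), ih]
      constructor
      · rintro ⟨q, hq, hql, hmem⟩
        refine ⟨x :: q, by simp, ?_, by simpa using hmem⟩
        obtain ⟨t, ht⟩ := hql
        exact ⟨t, by simp [← ht]⟩
      · rintro ⟨q, hq, hql, hmem⟩
        rcases List.prefix_cons_iff.mp hql with rfl | ⟨t, rfl, htp⟩
        · exact absurd rfl hq
        · cases t with
          | nil =>
            exact absurd (List.contains_iff_mem.mpr (by simpa using hmem)) hc
          | cons y ts =>
            exact ⟨y :: ts, by simp, htp, by simpa using hmem⟩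

-- characterisation of A
theorem pv_A_iff (L : List Int) (cands : List (List Int)) :
    check_minimality L cands = true ↔
      ∃ c ∈ cands, c ≠ [] ∧ c.Sublist L := by
  simp only [check_minimality, List.any_eq_true, List.mem_range]
  constructor
  · rintro ⟨a, _, b, hb, hpc⟩
    obtain ⟨hbs, _⟩ := (pv_mem_combos _ _ _).mp hb
    obtain ⟨q, hq, hql, hmem⟩ := (pv_prefCheck_iff _ _ _).mp hpc
    exact ⟨q, by simpa using hmem, hq, (hql.sublist).trans hbs⟩
  · rintro ⟨c, hmem, hc, hcs⟩
    have hlen : 1 ≤ c.length := by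
      cases c with | nil => exact absurd rfl hc | cons => simp
    refine ⟨c.length - 1, ?_, c, ?_, ?_⟩
    · have := hcs.length_le; omega
    · exact (pv_mem_combos _ _ _).mpr ⟨hcs, by omega⟩
    · exact (pv_prefCheck_iff _ _ _).mpr ⟨c, hc, List.prefix_refl c, by simpa using hmem⟩

-- greedy invariant: with i ≤ cand.length, the scan matches all of cand iff the
-- remaining suffix is a sublist of the remaining input
theorem pv_matchCount_iff (cand : List Int) (l : List Int) (i : Nat) (hi : i ≤ cand.length) :
    pvMatchCount cand i l = cand.length ↔ (cand.drop i).Sublist l := by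
  induction l generalizing i with
  | nil =>
    simp only [pvMatchCount, List.sublist_nil, List.drop_eq_nil_iff]
    omega
  | cons x xs ih =>
    simp only [pvMatchCount]
    by_cases hlt : i < cand.length
    · have hdrop : cand.drop i = cand[i] :: cand.drop (i + 1) := List.drop_eq_getElem_cons hlt
      by_cases hx : cand[i]? = some x
      · have hget : cand[i] = x := by
          rw [List.getElem?_eq_getElem hlt] at hx; exact Option.some.inj hx
        rw [if_pos ⟨hlt, hx⟩, ih (i + 1) (by omega), hdrop, hget]
        exact List.cons_sublist_cons.symm
      · have hget : cand[i] ≠ x := by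
          intro h; rw [List.getElem?_eq_getElem hlt, h] at hx; exact hx rfl
        rw [if_neg (fun h => hx h.2), ih i hi, hdrop]
        exact (pv_cons_sublist_cons_ne hget).symm
    · have hcond : ¬(i < cand.length ∧ cand[i]? = some x) := fun h => hlt h.1
      have hie : i = cand.length := by omega
      rw [if_neg hcond, ih i hi, hie, List.drop_length]
      simp

-- characterisation of B
theorem pv_B_iff (L : List Int) (cands : List (List Int)) :
    check_minimality_alt L cands = true ↔
      ∃ c ∈ cands, c ≠ [] ∧ c.Sublist L := by
  simp only [check_minimality_alt, List.any_eq_true, Bool.and_eq_true, Bool.not_eq_true',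
    List.isEmpty_eq_false_iff, beq_iff_eq]
  constructor
  · rintro ⟨c, hmem, hne, hmc⟩
    exact ⟨c, hmem, hne, by simpa using (pv_matchCount_iff c L 0 (by omega)).mp hmc⟩
  · rintro ⟨c, hmem, hne, hs⟩
    exact ⟨c, hmem, hne, (pv_matchCount_iff c L 0 (by omega)).mpr (by simpa using hs)⟩

-- ===== VERDICT (by name: the statement is the Claim_ definition above) =====
theorem check_minimality_spec : Claim_equal_check_minimality := by
  intro L cands _
  unfold Spec_check_minimality
  by_cases h : check_minimality L cands = true
  · rw [h, ((pv_B_iff L cands).mpr ((pv_A_iff L cands).mp h)).symm]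
  · have h2 : check_minimality_alt L cands ≠ true := fun hb =>
      h ((pv_A_iff L cands).mpr ((pv_B_iff L cands).mp hb))
    simp [Bool.eq_false_iff.mpr h, Bool.eq_false_iff.mpr h2]
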